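-- pv_equiv track=rewrite | github.com/tobiasagyasta/crm-mp78-backend | app/services/excel_export/sheets/daily_sheet.py | _add_mp78_management_ac_headers
-- ===== SOURCE A (Python) =====
-- def _add_mp78_management_ac_headers(headers):
--     header_positions = [
--         ('Shopee Difference', 'Shopee Net (ac)'),
--         ('Tiktok Net', 'Tiktok Net (ac)'),
--         ('Qpon Net', 'Qpon Net (ac)'),
--         ('Webshop Net', 'Webshop Net (ac)'),
--     ]
--
--     for anchor, header in header_positions:
--         if header not in headers and anchor in headers:
--             headers.insert(headers.index(anchor) + 1, header)
--
--     return headers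
-- ===== SOURCE B (Python) =====
-- def _add_mp78_management_ac_headers(headers):
--     mapping = {
--         'Shopee Difference': 'Shopee Net (ac)',
--         'Tiktok Net': 'Tiktok Net (ac)',
--         'Qpon Net': 'Qpon Net (ac)',
--         'Webshop Net': 'Webshop Net (ac)',
--     }
--     present = set(headers)
--     handled = set()
--     result = []
--     for h in headers:
--         result.append(h)
--         d = mapping.get(h)
--         if d is not None and d not in present and h not in handled:
--             result.append(d)
--             handled.add(h)
--     headers[:] = result
--     return headers
-- ===== Notes on version B (the rewrite author's own statement) =====
-- stated objective: alternative
-- what changed: Replaces the per-pair membership/index/insert passes over the header list by a dict of anchor->derived plus one linear pass that appends each header and, right after a first-occurrence anchor whose derived header is absent from the original list, its derived header; the result is slice-assigned back so the same list object is mutated in place.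
import Mathlib
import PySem

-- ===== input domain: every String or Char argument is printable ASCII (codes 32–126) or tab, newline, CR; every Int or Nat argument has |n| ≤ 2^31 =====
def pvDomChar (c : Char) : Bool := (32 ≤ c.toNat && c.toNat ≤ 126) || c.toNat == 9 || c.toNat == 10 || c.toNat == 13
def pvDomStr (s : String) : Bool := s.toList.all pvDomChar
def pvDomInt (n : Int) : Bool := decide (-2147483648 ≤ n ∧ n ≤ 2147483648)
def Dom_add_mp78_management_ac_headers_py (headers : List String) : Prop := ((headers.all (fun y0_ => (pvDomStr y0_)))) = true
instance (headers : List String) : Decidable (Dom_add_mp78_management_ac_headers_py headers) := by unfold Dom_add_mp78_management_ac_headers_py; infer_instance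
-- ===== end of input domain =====

-- B replaces A's per-pair index/insert passes by one linear pass driven by an anchor->derived dict
-- (objective: alternative single-pass algorithm, same cost; return-value equivalence — both A and B mutate the caller's list in Python).


-- ===== PORT A =====
-- the literal header_positions list of A (also the literal dict of B, as an association list)
def pvPairs : List (String × String) :=
  [("Shopee Difference", "Shopee Net (ac)"),
   ("Tiktok Net", "Tiktok Net (ac)"),
   ("Qpon Net", "Qpon Net (ac)"),
   ("Webshop Net", "Webshop Net (ac)")]

-- one iteration of A's for-loop: 'if header not in headers and anchor in headers: headers.insert(headers.index(anchor)+1, header)'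
def pvStepA (hs : List String) (p : String × String) : List String :=
  if p.2 ∉ hs ∧ p.1 ∈ hs then
    PySem.List.insert hs ((((PySem.List.index? hs p.1).getD 0) + 1 : Nat) : Int) p.2
  else hs

def add_mp78_management_ac_headers_py (headers : List String) : List String :=
  pvPairs.foldl pvStepA headers

-- ===== PORT B =====
-- B's literal mapping dict (anchor -> derived header)
def pvMapping : PySem.Dict String String :=
  PySem.Dict.ofList
    [("Shopee Difference", "Shopee Net (ac)"),
     ("Tiktok Net", "Tiktok Net (ac)"),
     ("Qpon Net", "Qpon Net (ac)"),
     ("Webshop Net", "Webshop Net (ac)")]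

-- body of B's single for-loop: append h; if h is an unhandled anchor whose derived header is not in the original list, append it
def pvStepB (present : PySem.Set String) (st : List String × PySem.Set String) (h : String) :
    List String × PySem.Set String :=
  let res := st.1 ++ [h]
  match pvMapping.get? h with
  | some d => if d ∉ present ∧ h ∉ st.2 then (res ++ [d], PySem.Set.add st.2 h) else (res, st.2)
  | none => (res, st.2)

def add_mp78_management_ac_headers_py_alt (headers : List String) : List String :=
  (headers.foldl (pvStepB (PySem.Set.ofList headers)) ([], PySem.Set.empty)).1

-- ===== PRECONDITION & SPEC =====
def Spec_add_mp78_management_ac_headers_py (headers : List String) (out : List String) : Prop := out = add_mp78_management_ac_headers_py_alt headers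
instance (headers : List String) (out : List String) : Decidable (Spec_add_mp78_management_ac_headers_py headers out) := by unfold Spec_add_mp78_management_ac_headers_py; infer_instance

-- ===== CLAIM (what is proved, stated in full; the proofs are below) =====
def Claim_equal_add_mp78_management_ac_headers_py : Prop := ∀ (headers : List String), Dom_add_mp78_management_ac_headers_py headers → Spec_add_mp78_management_ac_headers_py headers (add_mp78_management_ac_headers_py headers)

-- ===== LEMMAS AND PROOFS =====

-- insert d right after the first occurrence of a
def pvInsAfter (a d : String) : List String → List String
  | [] => []
  | h :: t => if h = a then h :: d :: t else h :: pvInsAfter a d t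

-- canonical single pass: act = pending (anchor, derived) pairs; on the first occurrence of an
-- anchor of act, emit its derived header and retire every pair with that anchor
def pvG : List (String × String) → List String → List String
  | _, [] => []
  | act, h :: t =>
    match List.lookup h act with
    | some d => h :: d :: pvG (act.filter (fun p => decide (p.1 ≠ h))) t
    | none => h :: pvG act t

-- A's loop, with the index-based insert replaced by pvInsAfter
def pvSeq : List (String × String) → List String → List String
  | [], hs => hs
  | p :: ps, hs => pvSeq ps (if p.2 ∉ hs ∧ p.1 ∈ hs then pvInsAfter p.1 p.2 hs else hs)

def pvGood (ps : List (String × String)) : Prop :=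
  (ps.map Prod.fst).Nodup ∧ (ps.map Prod.snd).Nodup ∧ ∀ p ∈ ps, p.1 ∉ ps.map Prod.snd

theorem pvG_cons_some {act : List (String × String)} {h d : String} (t : List String)
    (hl : List.lookup h act = some d) :
    pvG act (h :: t) = h :: d :: pvG (act.filter (fun p => decide (p.1 ≠ h))) t := by
  conv_lhs => rw [pvG]
  rw [hl]

theorem pvG_cons_none {act : List (String × String)} {h : String} (t : List String)
    (hl : List.lookup h act = none) :
    pvG act (h :: t) = h :: pvG act t := by
  conv_lhs => rw [pvG]
  rw [hl]

theorem pv_mem_insAfter {x d a : String} (hs : List String) (hxd : x ≠ d) :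
    x ∈ pvInsAfter a d hs ↔ x ∈ hs := by
  induction hs with
  | nil => simp [pvInsAfter]
  | cons h t ih =>
    by_cases h = a <;> simp [pvInsAfter, *]

theorem pv_insert_eq_insAfter {a : String} (hs : List String) (d : String) (ha : a ∈ hs) :
    PySem.List.insert hs ((((PySem.List.index? hs a).getD 0) + 1 : Nat) : Int) d
      = pvInsAfter a d hs := by
  induction hs with
  | nil => cases ha
  | cons h t ih =>
    by_cases hha : h = a
    · subst hha
      rw [PySem.List.index?_cons_self]
      rw [PySem.List.insert_natCast _ _ _ (by simp)]
      simp [pvInsAfter]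
    · have hat : a ∈ t := by cases ha with
        | head => exact absurd rfl hha
        | tail _ h' => exact h'
      rw [PySem.List.index?_cons_of_ne t hha]
      obtain ⟨k, hk⟩ := Option.isSome_iff_exists.mp ((PySem.List.index?_isSome_iff t a).mpr hat)
      obtain ⟨hklt, -, -⟩ := PySem.List.getElem_of_index?_eq_some hk
      rw [hk]
      have h1 : ((Option.some k).map (· + 1)).getD 0 + 1 = k + 2 := by simp
      rw [h1]
      rw [PySem.List.insert_natCast _ _ _ (by simp; omega)]
      have h2 : PySem.List.insert t (((k + 1 : Nat)) : Int) d = pvInsAfter a d t := by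
        rw [← ih hat, hk]; simp
      rw [PySem.List.insert_natCast _ _ _ (by omega)] at h2
      simp [pvInsAfter, hha, List.take_succ_cons, List.drop_succ_cons, ← h2]

theorem pv_foldlA_eq_seq (ps : List (String × String)) (hs : List String) :
    ps.foldl pvStepA hs = pvSeq ps hs := by
  induction ps generalizing hs with
  | nil => rfl
  | cons p ps ih =>
    have hstep : pvStepA hs p = if p.2 ∉ hs ∧ p.1 ∈ hs then pvInsAfter p.1 p.2 hs else hs := by
      unfold pvStepA
      split_ifs with hg
      · exact pv_insert_eq_insAfter hs p.2 hg.2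
      · rfl
    show ps.foldl pvStepA (pvStepA hs p) = _
    rw [hstep, ih]
    rfl

theorem pvG_nil (hs : List String) : pvG [] hs = hs := by
  induction hs with
  | nil => rfl
  | cons h t ih => simp [pvG, ih]

theorem pv_lookup_eq_none {h : String} {l : List (String × String)}
    (hno : h ∉ l.map Prod.fst) : List.lookup h l = none := by
  induction l with
  | nil => rfl
  | cons p t ih =>
    obtain ⟨k, v⟩ := p
    simp only [List.map_cons, List.mem_cons, not_or] at hno
    have hb : (h == k) = false := by simp [hno.1]
    simp [List.lookup, hb, ih hno.2]

theorem pv_filter_id_of_not_mem {a : String} {l : List (String × String)}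
    (hno : a ∉ l.map Prod.fst) : l.filter (fun p => decide (p.1 ≠ a)) = l := by
  rw [List.filter_eq_self]
  intro p hp
  simp only [decide_eq_true_eq]
  intro he
  exact hno (List.mem_map.mpr ⟨p, hp, he⟩)

-- main commutation: triggering the pair (a,d) first equals inserting d after a's first occurrence first
theorem pv_commute {a d : String} (hs : List String) (act : List (String × String))
    (ha : a ∈ hs) (hana : a ∉ act.map Prod.fst) (hdna : d ∉ act.map Prod.fst) :
    pvG ((a, d) :: act) hs = pvG act (pvInsAfter a d hs) := by
  induction hs generalizing act with
  | nil => cases ha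
  | cons h t ih =>
    by_cases hha : h = a
    · subst hha
      have l1 : List.lookup h ((h, d) :: act) = some d := by simp [List.lookup]
      have hfil : ((h, d) :: act).filter (fun p => decide (p.1 ≠ h)) = act := by
        simp only [List.filter_cons]
        rw [show decide (((h, d) : String × String).1 ≠ h) = false by simp]
        exact pv_filter_id_of_not_mem hana
      rw [pvG_cons_some t l1, hfil]
      rw [show pvInsAfter h d (h :: t) = h :: d :: t from by simp [pvInsAfter]]
      rw [pvG_cons_none (d :: t) (pv_lookup_eq_none hana)]
      rw [pvG_cons_none t (pv_lookup_eq_none hdna)]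
    · have hat : a ∈ t := by cases ha with
        | head => exact absurd rfl hha
        | tail _ h' => exact h'
      have hba : (h == a) = false := by simp [hha]
      have hins : pvInsAfter a d (h :: t) = h :: pvInsAfter a d t := by
        simp [pvInsAfter, hha]
      cases hl : List.lookup h act with
      | some d' =>
        have l1 : List.lookup h ((a, d) :: act) = some d' := by
          simp [List.lookup, hba, hl]
        have hfil : ((a, d) :: act).filter (fun p => decide (p.1 ≠ h)) =
            (a, d) :: act.filter (fun p => decide (p.1 ≠ h)) := by
          simp only [List.filter_cons]
          rw [show decide (((a, d) : String × String).1 ≠ h) = true by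
            simp only [decide_eq_true_eq]; exact fun he => hha he.symm]
          rfl
        have hsub : (act.filter (fun p => decide (p.1 ≠ h))).map Prod.fst ⊆ act.map Prod.fst := by
          intro x hx
          obtain ⟨p, hp, rfl⟩ := List.mem_map.mp hx
          exact List.mem_map.mpr ⟨p, List.mem_of_mem_filter hp, rfl⟩
        rw [pvG_cons_some t l1, hfil, hins, pvG_cons_some (pvInsAfter a d t) hl]
        rw [ih _ hat (fun h' => hana (hsub h')) (fun h' => hdna (hsub h'))]
      | none =>
        have l1 : List.lookup h ((a, d) :: act) = none := by
          simp [List.lookup, hba, hl]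
        rw [pvG_cons_none t l1, hins, pvG_cons_none (pvInsAfter a d t) hl]
        rw [ih _ hat hana hdna]

theorem pv_seq_eq_g (ps : List (String × String)) (hs : List String) (hg : pvGood ps) :
    pvSeq ps hs = pvG (ps.filter (fun p => decide (p.2 ∉ hs ∧ p.1 ∈ hs))) hs := by
  induction ps generalizing hs with
  | nil => simp [pvSeq, pvG_nil]
  | cons p ps ih =>
    obtain ⟨a, d⟩ := p
    obtain ⟨h1, h2, h3⟩ := hg
    simp only [List.map_cons, List.nodup_cons] at h1 h2
    have hgood : pvGood ps :=
      ⟨h1.2, h2.2, fun q hq hm => h3 q (List.mem_cons_of_mem _ hq) (by simp [hm])⟩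
    have hsubf : ∀ (P : String × String → Bool),
        (ps.filter P).map Prod.fst ⊆ ps.map Prod.fst := by
      intro P x hx
      obtain ⟨q, hq, rfl⟩ := List.mem_map.mp hx
      exact List.mem_map.mpr ⟨q, List.mem_of_mem_filter hq, rfl⟩
    have hp2nf : d ∉ ps.map Prod.fst := by
      intro hmem
      obtain ⟨q, hq, hqe⟩ := List.mem_map.mp hmem
      exact h3 q (List.mem_cons_of_mem _ hq) (by simp [hqe])
    have hseq : pvSeq ((a, d) :: ps) hs
        = pvSeq ps (if d ∉ hs ∧ a ∈ hs then pvInsAfter a d hs else hs) := rfl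
    rw [hseq]
    by_cases hcond : d ∉ hs ∧ a ∈ hs
    · rw [if_pos hcond, ih _ hgood]
      have hfc : List.filter (fun q => decide (q.2 ∉ pvInsAfter a d hs ∧ q.1 ∈ pvInsAfter a d hs)) ps
          = List.filter (fun q => decide (q.2 ∉ hs ∧ q.1 ∈ hs)) ps := by
        apply List.filter_congr
        intro q hq
        have hq2 : q.2 ≠ d := fun he => h2.1 (List.mem_map.mpr ⟨q, hq, he⟩)
        have hq1 : q.1 ≠ d := fun he =>
          h3 q (List.mem_cons_of_mem _ hq) (by simp [he])
        simp only [decide_eq_decide]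
        rw [pv_mem_insAfter hs hq2, pv_mem_insAfter hs hq1]
      rw [hfc]
      have hfp : List.filter (fun q => decide (q.2 ∉ hs ∧ q.1 ∈ hs)) ((a, d) :: ps)
          = (a, d) :: List.filter (fun q => decide (q.2 ∉ hs ∧ q.1 ∈ hs)) ps := by
        simp [List.filter_cons, hcond.1, hcond.2]
      rw [hfp]
      exact (pv_commute hs _ hcond.2
        (fun h' => h1.1 (hsubf _ h')) (fun h' => hp2nf (hsubf _ h'))).symm
    · rw [if_neg hcond, ih _ hgood]
      have hdec : decide (d ∉ hs ∧ a ∈ hs) = false := by simpa using hcond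
      have hfp : List.filter (fun q => decide (q.2 ∉ hs ∧ q.1 ∈ hs)) ((a, d) :: ps)
          = List.filter (fun q => decide (q.2 ∉ hs ∧ q.1 ∈ hs)) ps := by
        simp only [List.filter_cons]
        rw [show decide ((((a, d) : String × String)).2 ∉ hs ∧ (((a, d) : String × String)).1 ∈ hs) = false from hdec]
        rfl
      rw [hfp]

theorem pv_lookup_filter {l : List (String × String)} (hnd : (l.map Prod.fst).Nodup)
    (P : String × String → Bool) (h : String) :
    List.lookup h (l.filter P) =
      match List.lookup h l with
      | some d => if P (h, d) then some d else none
      | none => none := by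
  induction l with
  | nil => rfl
  | cons p t ih =>
    obtain ⟨k, v⟩ := p
    simp only [List.map_cons, List.nodup_cons] at hnd
    by_cases hph : k = h
    · subst hph
      have hlk : List.lookup k ((k, v) :: t) = some v := by simp [List.lookup]
      by_cases hP : P (k, v) = true
      · have hft : ((k, v) :: t).filter P = (k, v) :: t.filter P := by
          simp [List.filter_cons, hP]
        rw [hft, hlk]
        simp [List.lookup, hP]
      · have hPf : P (k, v) = false := by revert hP; cases P (k, v) <;> simp
        have hft : ((k, v) :: t).filter P = t.filter P := by
          simp [List.filter_cons, hPf]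
        rw [hft, hlk]
        have hnt : k ∉ (t.filter P).map Prod.fst := by
          intro hx
          obtain ⟨q, hq, hqe⟩ := List.mem_map.mp hx
          exact hnd.1 (hqe ▸ List.mem_map.mpr ⟨q, List.mem_of_mem_filter hq, rfl⟩)
        rw [pv_lookup_eq_none hnt]
        simp [hPf]
    · have hb : (h == k) = false := by
        simp only [beq_eq_false_iff_ne]
        exact fun he => hph he.symm
      have hlk : List.lookup h ((k, v) :: t) = List.lookup h t := by
        simp [List.lookup, hb]
      rw [hlk, ← ih hnd.2]
      by_cases hP : P (k, v) = true
      · have hft : ((k, v) :: t).filter P = (k, v) :: t.filter P := by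
          simp [List.filter_cons, hP]
        rw [hft]
        simp [List.lookup, hb]
      · have hPf : P (k, v) = false := by revert hP; cases P (k, v) <;> simp
        have hft : ((k, v) :: t).filter P = t.filter P := by
          simp [List.filter_cons, hPf]
        rw [hft]

theorem pv_dict_get_eq_lookup (h : String) :
    pvMapping.get? h = List.lookup h pvPairs := by
  have hmk : pvMapping = PySem.Dict.mk pvPairs := by decide
  rw [hmk]
  by_cases h1 : h = "Shopee Difference"
  · subst h1; decide
  by_cases h2 : h = "Tiktok Net"
  · subst h2; decide
  by_cases h3 : h = "Qpon Net"
  · subst h3; decide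
  by_cases h4 : h = "Webshop Net"
  · subst h4; decide
  have b1 : (("Shopee Difference" : String) == h) = false := by
    simp only [beq_eq_false_iff_ne]; exact fun e => h1 e.symm
  have b2 : (("Tiktok Net" : String) == h) = false := by
    simp only [beq_eq_false_iff_ne]; exact fun e => h2 e.symm
  have b3 : (("Qpon Net" : String) == h) = false := by
    simp only [beq_eq_false_iff_ne]; exact fun e => h3 e.symm
  have b4 : (("Webshop Net" : String) == h) = false := by
    simp only [beq_eq_false_iff_ne]; exact fun e => h4 e.symm
  have c1 : (h == ("Shopee Difference" : String)) = false := by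
    simp only [beq_eq_false_iff_ne]; exact h1
  have c2 : (h == ("Tiktok Net" : String)) = false := by
    simp only [beq_eq_false_iff_ne]; exact h2
  have c3 : (h == ("Qpon Net" : String)) = false := by
    simp only [beq_eq_false_iff_ne]; exact h3
  have c4 : (h == ("Webshop Net" : String)) = false := by
    simp only [beq_eq_false_iff_ne]; exact h4
  simp only [pvPairs, PySem.Dict.get?_mk_cons, List.lookup, b1, b2, b3, b4, c1, c2, c3, c4,
    Bool.false_eq_true, if_false]
  rfl

theorem pvStepB_none (pres : PySem.Set String) (st : List String × PySem.Set String) (h : String)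
    (hl : pvMapping.get? h = none) :
    pvStepB pres st h = (st.1 ++ [h], st.2) := by
  simp [pvStepB, hl]

theorem pvStepB_some_pos (pres : PySem.Set String) (st : List String × PySem.Set String)
    (h d : String) (hl : pvMapping.get? h = some d)
    (hc : d ∉ pres ∧ h ∉ st.2) :
    pvStepB pres st h = (st.1 ++ [h] ++ [d], PySem.Set.add st.2 h) := by
  simp [pvStepB, hl, hc.1, hc.2]

theorem pvStepB_some_neg (pres : PySem.Set String) (st : List String × PySem.Set String)
    (h d : String) (hl : pvMapping.get? h = some d)
    (hc : ¬(d ∉ pres ∧ h ∉ st.2)) :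
    pvStepB pres st h = (st.1 ++ [h], st.2) := by
  simp only [pvStepB, hl]
  rw [if_neg hc]

-- B's fold computes the canonical single pass
theorem pv_foldB_eq_g (hs0 : List String) (rest : List String)
    (res : List String) (handled : PySem.Set String)
    (hrest : ∀ h ∈ rest, h ∈ hs0) :
    (rest.foldl (pvStepB (PySem.Set.ofList hs0)) (res, handled)).1
      = res ++ pvG (pvPairs.filter
          (fun p => decide (p.2 ∉ hs0 ∧ p.1 ∈ hs0 ∧ p.1 ∉ handled))) rest := by
  induction rest generalizing res handled with
  | nil => simp [pvG]
  | cons h t ih =>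
    have hh0 : h ∈ hs0 := hrest h List.mem_cons_self
    have ht0 : ∀ x ∈ t, x ∈ hs0 := fun x hx => hrest x (List.mem_cons_of_mem _ hx)
    have hnd : (pvPairs.map Prod.fst).Nodup := by decide
    have hlf := pv_lookup_filter hnd
      (fun p => decide (p.2 ∉ hs0 ∧ p.1 ∈ hs0 ∧ p.1 ∉ handled)) h
    rw [List.foldl_cons]
    cases hl : List.lookup h pvPairs with
    | none =>
      simp only [hl] at hlf
      rw [pvStepB_none _ _ _ (by rw [pv_dict_get_eq_lookup, hl])]
      rw [ih _ _ ht0, pvG_cons_none t hlf]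
      simp
    | some d =>
      simp only [hl] at hlf
      by_cases hc : d ∉ PySem.Set.ofList hs0 ∧ h ∉ handled
      · have hd0 : d ∉ hs0 := fun hmem => hc.1 ((PySem.Set.mem_ofList hs0 d).mpr hmem)
        have hlf2 : List.lookup h (pvPairs.filter
            (fun p => decide (p.2 ∉ hs0 ∧ p.1 ∈ hs0 ∧ p.1 ∉ handled))) = some d := by
          rw [hlf]
          simp [hd0, hh0, hc.2]
        rw [pvStepB_some_pos _ _ _ _ (by rw [pv_dict_get_eq_lookup, hl]) hc]
        rw [ih _ _ ht0, pvG_cons_some t hlf2]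
        have hfe : pvPairs.filter
              (fun p => decide (p.2 ∉ hs0 ∧ p.1 ∈ hs0 ∧ p.1 ∉ PySem.Set.add handled h))
            = (pvPairs.filter
              (fun p => decide (p.2 ∉ hs0 ∧ p.1 ∈ hs0 ∧ p.1 ∉ handled))).filter
                (fun p => decide (p.1 ≠ h)) := by
          rw [List.filter_filter]
          apply List.filter_congr
          intro q hq
          rw [Bool.eq_iff_iff]
          simp only [Bool.and_eq_true, decide_eq_true_eq]
          constructor
          · rintro ⟨hq2, hq1, hq3⟩
            exact ⟨fun he => hq3 ((PySem.Set.mem_add handled h q.1).mpr (Or.inr he)),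
              hq2, hq1, fun hm => hq3 ((PySem.Set.mem_add handled h q.1).mpr (Or.inl hm))⟩
          · rintro ⟨hne, hq2, hq1, hq3⟩
            refine ⟨hq2, hq1, fun hm => ?_⟩
            rcases (PySem.Set.mem_add handled h q.1).mp hm with hm | hm
            · exact hq3 hm
            · exact hne hm
        rw [hfe]
        simp
      · have hlf2 : List.lookup h (pvPairs.filter
            (fun p => decide (p.2 ∉ hs0 ∧ p.1 ∈ hs0 ∧ p.1 ∉ handled))) = none := by
          rw [hlf]
          rw [if_neg]
          simp only [decide_eq_true_eq]
          rintro ⟨hd0', -, hh⟩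
          exact hc ⟨fun hm => hd0' ((PySem.Set.mem_ofList hs0 d).mp hm), hh⟩
        rw [pvStepB_some_neg _ _ _ _ (by rw [pv_dict_get_eq_lookup, hl]) hc]
        rw [ih _ _ ht0, pvG_cons_none t hlf2]
        simp

-- ===== VERDICT (by name: the statement is the Claim_ definition above) =====
theorem add_mp78_management_ac_headers_py_spec : Claim_equal_add_mp78_management_ac_headers_py := by
  intro headers _
  show add_mp78_management_ac_headers_py headers = add_mp78_management_ac_headers_py_alt headers
  unfold add_mp78_management_ac_headers_py add_mp78_management_ac_headers_py_alt
  have hgood : pvGood pvPairs := by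
    unfold pvGood
    refine ⟨by decide, by decide, by decide⟩
  rw [pv_foldlA_eq_seq, pv_seq_eq_g _ _ hgood,
      pv_foldB_eq_g headers headers [] PySem.Set.empty (fun _ hx => hx)]
  simp only [List.nil_append]
  congr 1
  apply List.filter_congr
  intro p _
  simp [PySem.Set.empty]
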